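-- pv_equiv track=rewrite | github.com/JLPT4YOU/jlpt_test | update_exam_parts.py | get_part_for_mondai
-- ===== SOURCE A (Python) =====
-- MONDAI_PART_MAPPING = {
--     "N1": {
--         "vocabulary": list(range(1, 6)),  # Mondai 1-5
--         "grammar": list(range(6, 9)),     # Mondai 6-8
--         "reading": list(range(9, 14)),    # Mondai 9-13
--         "listening": list(range(14, 19))  # Mondai 14-18
--     },
--     "N2": {
--         "vocabulary": list(range(1, 6)),  # Mondai 1-5
--         "grammar": list(range(6, 9)),     # Mondai 6-8
--         "reading": list(range(9, 14)),    # Mondai 9-13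
--         "listening": list(range(14, 20))  # Mondai 14-19 (some exams have 19)
--     },
--     "N3": {
--         "vocabulary": list(range(1, 6)),  # Mondai 1-5
--         "grammar": list(range(6, 9)),     # Mondai 6-8
--         "reading": list(range(9, 13)),    # Mondai 9-12
--         "listening": list(range(13, 18))  # Mondai 13-17
--     },
--     "N4": {
--         "vocabulary": list(range(1, 6)),  # Mondai 1-5
--         "grammar": list(range(6, 9)),     # Mondai 6-8
--         "reading": list(range(9, 12)),    # Mondai 9-11
--         "listening": list(range(12, 16))  # Mondai 12-15
--     },
--     "N5": {
--         "vocabulary": list(range(1, 5)),  # Mondai 1-4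
--         "grammar": list(range(5, 8)),     # Mondai 5-7
--         "reading": list(range(8, 11)),    # Mondai 8-10
--         "listening": list(range(11, 15))  # Mondai 11-14
--     }
-- }
--
-- def get_part_for_mondai(level: str, mondai: int) -> str:
--     """Get the part name for a given level and mondai number"""
--     mapping = MONDAI_PART_MAPPING.get(level)
--     if not mapping:
--         return None
--
--     for part, mondai_list in mapping.items():
--         if mondai in mondai_list:
--             return part
--     return None
-- ===== SOURCE B (Python) =====
-- # Upper boundaries (vocabulary, grammar, reading, listening) per level.
-- PART_BOUNDS = {
--     "N1": (5, 8, 13, 18),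
--     "N2": (5, 8, 13, 19),
--     "N3": (5, 8, 12, 17),
--     "N4": (5, 8, 11, 15),
--     "N5": (4, 7, 10, 14),
-- }
--
-- def get_part_for_mondai(level: str, mondai: int) -> str:
--     """Get the part name for a given level and mondai number"""
--     bounds = PART_BOUNDS.get(level)
--     if bounds is None:
--         return None
--     v, g, r, l = bounds
--     if mondai < 1 or mondai > l:
--         return None
--     if mondai <= v:
--         return "vocabulary"
--     if mondai <= g:
--         return "grammar"
--     if mondai <= r:
--         return "reading"
--     return "listening"
-- ===== Notes on version B (the rewrite author's own statement) =====
-- stated objective: simpler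
-- what changed: Replaces A's loop over parts with inner list-membership scans by closed-form interval arithmetic: a small table of per-level upper boundaries and a chain of threshold comparisons.
import Mathlib
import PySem

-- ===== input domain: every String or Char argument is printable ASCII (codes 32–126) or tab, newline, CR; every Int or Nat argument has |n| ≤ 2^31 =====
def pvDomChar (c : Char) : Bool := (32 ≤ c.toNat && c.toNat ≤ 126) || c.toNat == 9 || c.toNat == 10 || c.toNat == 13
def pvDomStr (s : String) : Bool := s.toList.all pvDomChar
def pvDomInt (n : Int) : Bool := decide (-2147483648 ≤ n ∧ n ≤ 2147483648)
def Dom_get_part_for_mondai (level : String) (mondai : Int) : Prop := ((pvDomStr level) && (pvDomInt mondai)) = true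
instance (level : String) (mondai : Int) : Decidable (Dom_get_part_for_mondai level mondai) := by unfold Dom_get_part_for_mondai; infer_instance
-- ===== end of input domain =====

-- B replaces A's loop over parts with inner list-membership scans by closed-form interval
-- arithmetic over a small table of per-level boundaries; objective: simpler.

-- ===== PORT A =====
-- MONDAI_PART_MAPPING: dict literal with all-distinct keys, ported as Dict.mk of the items
-- in source order (identical to insertion); list(range(a, b)) is PySem.List.pyRange a b 1.
def pvMONDAI : PySem.Dict String (PySem.Dict String (List Int)) :=
  PySem.Dict.mk [
    ("N1", PySem.Dict.mk [("vocabulary", PySem.List.pyRange 1 6 1), ("grammar", PySem.List.pyRange 6 9 1),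
           ("reading", PySem.List.pyRange 9 14 1), ("listening", PySem.List.pyRange 14 19 1)]),
    ("N2", PySem.Dict.mk [("vocabulary", PySem.List.pyRange 1 6 1), ("grammar", PySem.List.pyRange 6 9 1),
           ("reading", PySem.List.pyRange 9 14 1), ("listening", PySem.List.pyRange 14 20 1)]),
    ("N3", PySem.Dict.mk [("vocabulary", PySem.List.pyRange 1 6 1), ("grammar", PySem.List.pyRange 6 9 1),
           ("reading", PySem.List.pyRange 9 13 1), ("listening", PySem.List.pyRange 13 18 1)]),
    ("N4", PySem.Dict.mk [("vocabulary", PySem.List.pyRange 1 6 1), ("grammar", PySem.List.pyRange 6 9 1),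
           ("reading", PySem.List.pyRange 9 12 1), ("listening", PySem.List.pyRange 12 16 1)]),
    ("N5", PySem.Dict.mk [("vocabulary", PySem.List.pyRange 1 5 1), ("grammar", PySem.List.pyRange 5 8 1),
           ("reading", PySem.List.pyRange 8 11 1), ("listening", PySem.List.pyRange 11 15 1)])]

-- 'for part, mondai_list in mapping.items(): if mondai in mondai_list: return part'
def pvLoopA : List (String × List Int) → Int → Option String
  | [], _ => none
  | (part, ms) :: rest, m => if m ∈ ms then some part else pvLoopA rest m

def get_part_for_mondai (level : String) (mondai : Int) : Option String :=
  match pvMONDAI.get? level with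
  | none => none
  | some mapping =>
    -- 'if not mapping: return None' (an empty dict is falsy)
    if mapping.items = [] then none else pvLoopA mapping.items mondai

-- ===== PORT B =====
-- PART_BOUNDS: the per-level (vocabulary, grammar, reading, listening) upper boundaries.
def pvPART_BOUNDS : PySem.Dict String (Int × Int × Int × Int) :=
  PySem.Dict.mk [
    ("N1", (5, 8, 13, 18)),
    ("N2", (5, 8, 13, 19)),
    ("N3", (5, 8, 12, 17)),
    ("N4", (5, 8, 11, 15)),
    ("N5", (4, 7, 10, 14))]

def get_part_for_mondai_alt (level : String) (mondai : Int) : Option String :=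
  match pvPART_BOUNDS.get? level with
  | none => none
  | some (v, g, r, l) =>
    if mondai < 1 ∨ mondai > l then none
    else if mondai ≤ v then some "vocabulary"
    else if mondai ≤ g then some "grammar"
    else if mondai ≤ r then some "reading"
    else some "listening"

-- ===== PRECONDITION & SPEC =====
def Spec_get_part_for_mondai (level : String) (mondai : Int) (out : Option String) : Prop := out = get_part_for_mondai_alt level mondai
instance (level : String) (mondai : Int) (out : Option String) : Decidable (Spec_get_part_for_mondai level mondai out) := by unfold Spec_get_part_for_mondai; infer_instance

-- ===== CLAIM =====
def Claim_equal_get_part_for_mondai : Prop := ∀ (level : String) (mondai : Int), Dom_get_part_for_mondai level mondai → Spec_get_part_for_mondai level mondai (get_part_for_mondai level mondai)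

-- ===== LEMMAS AND PROOFS =====

-- ===== VERDICT =====
set_option maxRecDepth 8192 in
set_option maxHeartbeats 2000000 in
theorem get_part_for_mondai_spec : Claim_equal_get_part_for_mondai := by
  intro level mondai _
  unfold Spec_get_part_for_mondai
  by_cases hl : level = "N1" ∨ level = "N2" ∨ level = "N3" ∨ level = "N4" ∨ level = "N5"
  · by_cases hm : 1 ≤ mondai ∧ mondai ≤ 19
    · obtain ⟨hm1, hm2⟩ := hm
      rcases hl with rfl|rfl|rfl|rfl|rfl <;> interval_cases mondai <;> decide
    · push Not at hm
      rcases hl with rfl|rfl|rfl|rfl|rfl <;>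
      · simp [get_part_for_mondai, get_part_for_mondai_alt, pvMONDAI, pvPART_BOUNDS, pvLoopA,
          PySem.Dict.get?, PySem.List.pyRange]
        split_ifs <;> first | rfl | omega | (exfalso; omega)
  · push Not at hl
    obtain ⟨h1, h2, h3, h4, h5⟩ := hl
    simp [get_part_for_mondai, get_part_for_mondai_alt, pvMONDAI, pvPART_BOUNDS,
      PySem.Dict.get?, PySem.List.pyRange, beq_iff_eq,
      Ne.symm h1, Ne.symm h2, Ne.symm h3, Ne.symm h4, Ne.symm h5]
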